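-- pv_equiv track=rewrite | github.com/halemiles/pre-commit-hooks | hooks/fix_yaml_comment_spacing.py | _line_has_unquoted_hash
-- ===== SOURCE A (Python) =====
-- def _line_has_unquoted_hash(line: str) -> bool:
--     """Return True if *line* contains a '#' outside of any quoted string."""
--     in_single = False
--     in_double = False
--     for ch in line:
--         if ch == "'" and not in_double:
--             in_single = not in_single
--         elif ch == '"' and not in_single:
--             in_double = not in_double
--         elif ch == '#' and not in_single and not in_double:
--             return True
--     return False
-- ===== SOURCE B (Python) =====
-- import re
--
-- _QUOTED = re.compile(r"'[^']*'?|\"[^\"]*\"?")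
--
-- def _line_has_unquoted_hash(line: str) -> bool:
--     """Return True if *line* contains a '#' outside of any quoted string."""
--     return '#' in _QUOTED.sub('', line)
-- ===== Notes on version B (the rewrite author's own statement) =====
-- stated objective: idiomatic
-- what changed: Replaces the explicit in_single/in_double character state machine with one regex substitution that deletes quoted regions (an unterminated quote consumes to end of line) followed by a hash-membership test; the C-level regex scan is also measurably faster.
import Mathlib
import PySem

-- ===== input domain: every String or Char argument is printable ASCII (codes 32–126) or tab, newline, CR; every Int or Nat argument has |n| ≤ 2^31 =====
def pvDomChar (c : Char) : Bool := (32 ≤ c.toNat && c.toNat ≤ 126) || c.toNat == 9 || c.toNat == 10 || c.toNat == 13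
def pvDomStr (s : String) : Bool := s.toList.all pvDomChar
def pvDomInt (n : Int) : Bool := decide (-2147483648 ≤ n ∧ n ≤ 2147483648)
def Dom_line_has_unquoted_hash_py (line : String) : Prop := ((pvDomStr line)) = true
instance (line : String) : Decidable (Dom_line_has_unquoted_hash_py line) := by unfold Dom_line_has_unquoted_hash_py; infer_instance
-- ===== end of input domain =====

-- B replaces A's explicit quote-state machine by delete-quoted-regions-then-test-membership via one regex substitution (idiomatic; measured faster in a timing run).


-- ===== PORT A =====
-- A's for-loop with early return: structural recursion over the chars with the
-- (in_single, in_double) state.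
def pvAgo : List Char → Bool → Bool → Bool
  | [], _, _ => false
  | c :: cs, in_single, in_double =>
    if c = '\'' && !in_double then pvAgo cs (!in_single) in_double
    else if c = '"' && !in_single then pvAgo cs in_single (!in_double)
    else if c = '#' && !in_single && !in_double then true
    else pvAgo cs in_single in_double

def line_has_unquoted_hash_py (line : String) : Bool :=
  pvAgo line.toList false false

-- ===== PORT B =====
-- B deletes quoted regions with one regex substitution re.sub(r"'[^']*'?|\"[^\"]*\"?", '', line)
-- and tests '#' in the residue.  The regex engine's left-to-right non-overlapping
-- matching of that pattern is ported exactly: on meeting a quote, drop up to and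
-- including the next matching quote (or to end of line if unterminated).
def pvSkipTo (q : Char) : List Char → List Char
  | [] => []
  | c :: cs => if c = q then cs else pvSkipTo q cs

theorem pvSkipTo_length (q : Char) (cs : List Char) : (pvSkipTo q cs).length ≤ cs.length := by
  induction cs with
  | nil => simp [pvSkipTo]
  | cons c cs ih => simp only [pvSkipTo]; split
                    · simp
                    · simpa using Nat.le_succ_of_le ih

def pvStrip : List Char → List Char
  | [] => []
  | c :: cs =>
    if c = '\'' then pvStrip (pvSkipTo '\'' cs)
    else if c = '"' then pvStrip (pvSkipTo '"' cs)
    else c :: pvStrip cs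
termination_by cs => cs.length
decreasing_by
  · exact Nat.lt_succ_of_le (pvSkipTo_length _ _)
  · exact Nat.lt_succ_of_le (pvSkipTo_length _ _)
  · simp

def line_has_unquoted_hash_py_alt (line : String) : Bool :=
  (pvStrip line.toList).contains '#'


-- ===== PRECONDITION & SPEC =====
def Spec_line_has_unquoted_hash_py (line : String) (out : Bool) : Prop := out = line_has_unquoted_hash_py_alt line
instance (line : String) (out : Bool) : Decidable (Spec_line_has_unquoted_hash_py line out) := by unfold Spec_line_has_unquoted_hash_py; infer_instance

-- ===== CLAIM (what is proved, stated in full; the proofs are below) =====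
def Claim_equal_line_has_unquoted_hash_py : Prop := ∀ (line : String), Dom_line_has_unquoted_hash_py line → Spec_line_has_unquoted_hash_py line (line_has_unquoted_hash_py line)

-- ===== LEMMAS AND PROOFS =====
-- inside a single-quoted region: only the matching quote matters
theorem pvAgo_single (cs : List Char) : pvAgo cs true false = pvAgo (pvSkipTo '\'' cs) false false := by
  induction cs with
  | nil => simp [pvAgo, pvSkipTo]
  | cons c cs ih =>
    by_cases h : c = '\''
    · simp [pvAgo, pvSkipTo, h]
    · simp [pvAgo, pvSkipTo, h, ih]

theorem pvAgo_double (cs : List Char) : pvAgo cs false true = pvAgo (pvSkipTo '"' cs) false false := by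
  induction cs with
  | nil => simp [pvAgo, pvSkipTo]
  | cons c cs ih =>
    by_cases h : c = '"'
    · simp [pvAgo, pvSkipTo, h]
    · simp [pvAgo, pvSkipTo, h, ih]

theorem pvAgo_eq_strip (cs : List Char) : pvAgo cs false false = (pvStrip cs).contains '#' := by
  induction cs using pvStrip.induct with
  | case1 => simp [pvAgo, pvStrip]
  | case2 cs ih =>
    simpa [pvAgo, pvStrip, pvAgo_single] using ih
  | case3 cs h ih =>
    simpa [pvAgo, pvStrip, pvAgo_double] using ih
  | case4 c cs h h2 ih =>
    by_cases hh : c = '#'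
    · simp [pvAgo, pvStrip, hh]
    · simp [pvAgo, pvStrip, h, h2, hh, ih, Ne.symm hh]


-- ===== VERDICT (by name: the statement is the Claim_ definition above) =====
theorem line_has_unquoted_hash_py_spec : Claim_equal_line_has_unquoted_hash_py := by
  intro line _
  unfold Spec_line_has_unquoted_hash_py line_has_unquoted_hash_py line_has_unquoted_hash_py_alt
  exact pvAgo_eq_strip line.toList
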